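-- pv_equiv track=rewrite | github.com/shucheng-ai/WDA-cad | canvas.py | angle_cad_to_cv
-- ===== SOURCE A (Python) =====
-- def angle_cad_to_cv (angle, start_angle, end_angle, flip=True):
--     angle = round(angle)
--     start_angle = round(start_angle)
--     end_angle = round(end_angle)
--
--     if start_angle == 0 and end_angle == 360:
--         return angle, 0, 360
--
--     if flip:
--         angle, start_angle, end_angle = -angle, -end_angle, -start_angle
--
--     while end_angle < start_angle:
--         end_angle += 360
--
--     if end_angle - start_angle > 180:
--         end_angle -= 360
--         start_angle, end_angle = end_angle, start_angle
--     return angle, start_angle, end_angle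
-- ===== SOURCE B (Python) =====
-- def _flipped(angle, start_angle, end_angle):
--     return -angle, -end_angle, -start_angle
--
-- def _lift(start_angle, end_angle):
--     # smallest end_angle + 360*k (k >= 0) that is >= start_angle, via one modulus
--     if end_angle < start_angle:
--         return start_angle + (end_angle - start_angle) % 360
--     return end_angle
--
-- def _orient(angle, start_angle, end_angle):
--     if end_angle - start_angle > 180:
--         return angle, end_angle - 360, start_angle
--     return angle, start_angle, end_angle
--
-- def angle_cad_to_cv(angle, start_angle, end_angle, flip=True):
--     angle = round(angle)
--     start_angle = round(start_angle)
--     end_angle = round(end_angle)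
--     if start_angle == 0 and end_angle == 360:
--         return angle, 0, 360
--     if flip:
--         angle, start_angle, end_angle = _flipped(angle, start_angle, end_angle)
--     return _orient(angle, start_angle, _lift(start_angle, end_angle))
-- ===== Notes on version B (the rewrite author's own statement) =====
-- stated objective: alternative
-- what changed: Decomposes the function into three small helpers and replaces the repeated `end_angle += 360` while-loop with a single modular computation `start_angle + (end_angle - start_angle) % 360`.
import Mathlib
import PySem

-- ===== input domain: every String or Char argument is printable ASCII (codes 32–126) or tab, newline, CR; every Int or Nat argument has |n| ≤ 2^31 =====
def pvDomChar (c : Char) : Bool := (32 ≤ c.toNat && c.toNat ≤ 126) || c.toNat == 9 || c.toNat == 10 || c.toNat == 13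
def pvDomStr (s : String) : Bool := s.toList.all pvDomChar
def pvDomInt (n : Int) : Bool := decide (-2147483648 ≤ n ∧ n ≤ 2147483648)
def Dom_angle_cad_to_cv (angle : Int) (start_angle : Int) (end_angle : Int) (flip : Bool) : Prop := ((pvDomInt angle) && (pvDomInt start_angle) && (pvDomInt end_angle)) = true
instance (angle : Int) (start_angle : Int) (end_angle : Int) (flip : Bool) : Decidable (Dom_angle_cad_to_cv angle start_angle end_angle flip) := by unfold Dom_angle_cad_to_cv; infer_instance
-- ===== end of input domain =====

-- B decomposes the function into three helpers and replaces A's `end_angle += 360` while-loop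
-- by a single modular computation (a different decomposition and a closed form in place of the loop).
-- ===== PORT A =====
-- while end_angle < start_angle: end_angle += 360   (round() on an int is the identity, inputs are Int)
def pvBumpLoop (start_angle end_angle : Int) : Int :=
  if end_angle < start_angle then pvBumpLoop start_angle (end_angle + 360) else end_angle
termination_by (start_angle - end_angle).toNat
decreasing_by omega

def angle_cad_to_cv (angle : Int) (start_angle : Int) (end_angle : Int) (flip : Bool) : Int × Int × Int :=
  if start_angle = 0 ∧ end_angle = 360 then (angle, 0, 360)
  else
    let (a, s, e) := if flip then (-angle, -end_angle, -start_angle) else (angle, start_angle, end_angle)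
    let e := pvBumpLoop s e
    if e - s > 180 then (a, e - 360, s) else (a, s, e)

-- ===== PORT B =====
def pvFlipped (angle start_angle end_angle : Int) : Int × Int × Int :=
  (-angle, -end_angle, -start_angle)

def pvLift (start_angle end_angle : Int) : Int :=
  if end_angle < start_angle then start_angle + PySem.Int.mod (end_angle - start_angle) 360
  else end_angle

def pvOrient (angle start_angle end_angle : Int) : Int × Int × Int :=
  if end_angle - start_angle > 180 then (angle, end_angle - 360, start_angle)
  else (angle, start_angle, end_angle)

def angle_cad_to_cv_alt (angle : Int) (start_angle : Int) (end_angle : Int) (flip : Bool) : Int × Int × Int :=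
  if start_angle = 0 ∧ end_angle = 360 then (angle, 0, 360)
  else
    match (if flip then pvFlipped angle start_angle end_angle else (angle, start_angle, end_angle)) with
    | (a, s, e) => pvOrient a s (pvLift s e)

-- ===== PRECONDITION & SPEC =====
def Spec_angle_cad_to_cv (angle : Int) (start_angle : Int) (end_angle : Int) (flip : Bool) (out : Int × Int × Int) : Prop := out = angle_cad_to_cv_alt angle start_angle end_angle flip
instance (angle : Int) (start_angle : Int) (end_angle : Int) (flip : Bool) (out : Int × Int × Int) : Decidable (Spec_angle_cad_to_cv angle start_angle end_angle flip out) := by unfold Spec_angle_cad_to_cv; infer_instance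

-- ===== CLAIM =====
def Claim_equal_angle_cad_to_cv : Prop := ∀ (angle : Int) (start_angle : Int) (end_angle : Int) (flip : Bool), Dom_angle_cad_to_cv angle start_angle end_angle flip → Spec_angle_cad_to_cv angle start_angle end_angle flip (angle_cad_to_cv angle start_angle end_angle flip)

-- ===== LEMMAS AND PROOFS =====
theorem pvBumpLoop_eq_pvLift (s e : Int) : pvBumpLoop s e = pvLift s e := by
  by_cases h : e < s
  · rw [pvBumpLoop, if_pos h, pvBumpLoop_eq_pvLift s (e + 360)]
    unfold pvLift
    simp only [PySem.Int.mod_eq_emod_of_pos (show (0:Int) < 360 by norm_num)]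
    by_cases h2 : e + 360 < s
    · rw [if_pos h2, if_pos h]
      have : (e + 360 - s) % 360 = (e - s) % 360 := by
        have : e + 360 - s = (e - s) + 1 * 360 := by ring
        rw [this, Int.add_mul_emod_self_right]
      omega
    · rw [if_neg h2, if_pos h]
      omega
  · unfold pvLift
    rw [pvBumpLoop, if_neg h, if_neg h]
termination_by (s - e).toNat
decreasing_by omega

-- ===== VERDICT =====
theorem angle_cad_to_cv_spec : Claim_equal_angle_cad_to_cv := by
  intro angle start_angle end_angle flip _
  unfold Spec_angle_cad_to_cv angle_cad_to_cv angle_cad_to_cv_alt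
  by_cases h0 : start_angle = 0 ∧ end_angle = 360
  · simp [h0]
  · simp only [if_neg h0]
    cases flip <;> simp [pvFlipped, pvOrient, pvBumpLoop_eq_pvLift]
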